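-- pv_equiv track=rewrite | github.com/AdamKorzun/mzi-sem7 | lab1/lab1.py | bin_list_to_string
-- ===== SOURCE A (Python) =====
-- def bin_list_to_string(lst):
--     if len(lst) % 8:
--         zeros = [0 for i in range(8 - len(lst) % 8)]
--         lst = zeros + lst
--     res = ''
--     for i in range(0, len(lst), 8):
--         x = 0
--         for j in range(i, i + 8):
--             x = x * 2 + lst[j]
--         res += chr(x)
--     return res
-- ===== SOURCE B (Python) =====
-- def bin_list_to_string(lst):
--     out = []
--     i = len(lst)
--     while i > 0:
--         chunk = lst[max(0, i - 8):i]
--         x = 0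
--         for p, b in enumerate(reversed(chunk)):
--             x += b << p
--         out.append(chr(x))
--         i -= 8
--     return ''.join(reversed(out))
-- ===== Notes on version B (the rewrite author's own statement) =====
-- stated objective: alternative
-- what changed: B never materializes the zero-padded list or index ranges: it walks the list back-to-front slicing 8-element chunks off the end (the short first chunk needs no padding) and decodes each chunk with positional shifts (b << p over the reversed chunk) instead of A's forward Horner accumulation over index ranges, then reverses the collected characters.
import Mathlib
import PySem

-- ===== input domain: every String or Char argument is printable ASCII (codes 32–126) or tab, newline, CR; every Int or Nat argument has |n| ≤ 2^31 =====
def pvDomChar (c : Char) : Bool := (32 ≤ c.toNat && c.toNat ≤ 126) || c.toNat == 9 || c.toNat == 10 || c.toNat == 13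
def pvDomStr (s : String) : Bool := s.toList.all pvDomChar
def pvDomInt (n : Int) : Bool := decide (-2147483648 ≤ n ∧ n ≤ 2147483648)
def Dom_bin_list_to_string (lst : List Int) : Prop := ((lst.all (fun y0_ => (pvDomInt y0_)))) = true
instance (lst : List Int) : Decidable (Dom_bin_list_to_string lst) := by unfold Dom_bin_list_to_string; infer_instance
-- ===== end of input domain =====

-- B builds the string back-to-front: it slices 8-element chunks from the END of the list (implicit
-- front padding) and decodes each with positional shifts, instead of A's padded index-range Horner
-- loops (alternative decomposition; same cost).


-- ===== PORT A =====
-- chr(x) ported as Char.ofNat x.toNat: exact for the non-surrogate scalar values Pre_ admits.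
-- lst[j] ported as pyGetD: the indices the loops produce are always in range on the padded list.
def bin_list_to_string (lst : List Int) : String :=
  let l := if lst.length % 8 ≠ 0 then List.replicate (8 - lst.length % 8) (0 : Int) ++ lst else lst
  (PySem.List.pyRange 0 (l.length : Int) 8).foldl
    (fun res i =>
      let x := (PySem.List.pyRange i (i + 8) 1).foldl
        (fun x j => x * 2 + PySem.List.pyGetD l j 0) 0
      res.push (Char.ofNat x.toNat))
    ""

-- ===== PORT B =====
-- the while loop of Source B: chunk = lst[max(0, i-8):i]; x = sum of b << p over enumerate(reversed(chunk));
-- out.append(chr(x)); i -= 8.  chr ported as Char.ofNat x.toNat (exact under Pre_).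
def binAltLoop (lst : List Int) (i : Int) (out : List Char) : List Char :=
  if 0 < i then
    let chunk := PySem.List.slice lst (some (max 0 (i - 8))) (some i)
    let x := chunk.reverse.zipIdx.foldl (fun x p => x + p.1 * 2 ^ p.2) 0
    binAltLoop lst (i - 8) (out ++ [Char.ofNat x.toNat])
  else out
termination_by i.toNat
decreasing_by omega

-- ''.join(reversed(out))
def bin_list_to_string_alt (lst : List Int) : String :=
  String.ofList (binAltLoop lst (lst.length : Int) []).reverse

-- ===== PRECONDITION & SPEC =====
-- helpers for Pre_: the aligned 8-windows of the front-padded input and each window's value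
def pvWindowsF : Nat → List Int → List (List Int)
  | 0, _ => []
  | k + 1, l => l.take 8 :: pvWindowsF k (l.drop 8)
def pvWinVal (w : List Int) : Int := (w.reverse.zipIdx.map (fun p => p.1 * 2 ^ p.2)).sum
def pvPadded (lst : List Int) : List Int :=
  List.replicate ((8 - lst.length % 8) % 8) (0 : Int) ++ lst
-- Pre_ admits exactly the inputs whose aligned 8-window values are valid non-surrogate code points:
-- on other window values A raises ValueError/OverflowError in chr, or (surrogate values 0xD800–0xDFFF)
-- returns a lone-surrogate string that a Lean String cannot represent.
def Pre_bin_list_to_string (lst : List Int) : Prop :=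
  ∀ w ∈ pvWindowsF ((lst.length + 7) / 8) (pvPadded lst),
    (0 ≤ pvWinVal w ∧ pvWinVal w < 55296) ∨ (57344 ≤ pvWinVal w ∧ pvWinVal w ≤ 1114111)
instance (lst : List Int) : Decidable (Pre_bin_list_to_string lst) := by
  unfold Pre_bin_list_to_string; infer_instance
def pvWitness_bin_list_to_string : List Int := [1, 0, 1, 0, 0, 1, 1, 0, 1, 1]
def Spec_bin_list_to_string (lst : List Int) (out : String) : Prop := out = bin_list_to_string_alt lst
instance (lst : List Int) (out : String) : Decidable (Spec_bin_list_to_string lst out) := by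
  unfold Spec_bin_list_to_string; infer_instance

-- ===== CLAIM (what is proved, stated in full; the proofs are below) =====
def Claim_equal_bin_list_to_string : Prop := ∀ (lst : List Int), Dom_bin_list_to_string lst → Pre_bin_list_to_string lst → Spec_bin_list_to_string lst (bin_list_to_string lst)

-- ===== LEMMAS AND PROOFS =====

theorem pv_val_init (l : List Int) (t : Int) :
    l.foldl (fun a b => a * 2 + b) t = t * 2 ^ l.length + l.foldl (fun a b => a * 2 + b) 0 := by
  induction l generalizing t with
  | nil => simp
  | cons b l ih =>
    simp only [List.foldl_cons, List.length_cons]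
    rw [ih (t * 2 + b), ih (0 * 2 + b)]
    ring

theorem pv_val_append (c r : List Int) :
    (c ++ r).foldl (fun a b => a * 2 + b) 0
      = (c.foldl (fun a b => a * 2 + b) 0) * 2 ^ r.length + r.foldl (fun a b => a * 2 + b) 0 := by
  rw [List.foldl_append, pv_val_init]

theorem pv_val_replicate_zero (z : Nat) :
    (List.replicate z (0 : Int)).foldl (fun a b => a * 2 + b) 0 = 0 := by
  induction z with
  | zero => simp
  | succ z ih => simpa [List.replicate_succ] using ih

theorem pv_zipIdx_shift (t : List Int) (n : Nat) :
    ((t.zipIdx n).map (fun p => p.1 * 2 ^ p.2)).sum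
      = 2 ^ n * ((t.zipIdx 0).map (fun p => p.1 * 2 ^ p.2)).sum := by
  induction t generalizing n with
  | nil => simp
  | cons a t ih =>
    rw [List.zipIdx_cons, List.zipIdx_cons]
    simp only [List.map_cons, List.sum_cons]
    rw [ih (n + 1), ih 1]
    ring

theorem pv_shift_sum_eq_horner (w : List Int) :
    w.reverse.zipIdx.foldl (fun x p => x + p.1 * 2 ^ p.2) 0
      = w.foldl (fun a b => a * 2 + b) 0 := by
  have hfold : ∀ (l : List (Int × Nat)),
      l.foldl (fun x p => x + p.1 * 2 ^ p.2) 0 = (l.map (fun p => p.1 * 2 ^ p.2)).sum := by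
    intro l
    rw [List.sum_eq_foldl, List.foldl_map]
  rw [hfold]
  induction w using List.reverseRecOn with
  | nil => simp
  | append_singleton w b ih =>
    rw [List.reverse_append, List.reverse_singleton, List.singleton_append, List.zipIdx_cons]
    simp only [List.map_cons, List.sum_cons]
    rw [pv_zipIdx_shift _ 1, ih, pv_val_append]
    simp
    ring

theorem pv_range8_nil (a : Int) : PySem.List.pyRange a a 8 = [] := by
  rw [PySem.List.pyRange_of_pos a a (by norm_num)]
  simp

theorem pv_range8_cons (a : Int) (k : Nat) :
    PySem.List.pyRange a (a + 8 * (k + 1)) 8 = a :: PySem.List.pyRange (a + 8) (a + 8 + 8 * k) 8 := by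
  rw [PySem.List.pyRange_of_pos _ _ (by norm_num : (0:Int) < 8),
      PySem.List.pyRange_of_pos _ _ (by norm_num : (0:Int) < 8)]
  have h1 : a < a + 8 * ((k:Int) + 1) := by omega
  have e1 : ((a + 8 * ((k:Int) + 1) - a + 8 - 1) / 8).toNat = k + 1 := by
    have : (a + 8 * ((k:Int) + 1) - a + 8 - 1) = 8 * (k + 1) + 7 := by ring
    rw [this]
    omega
  rw [if_pos h1, e1]
  have e2 : (if a + 8 < a + 8 + 8 * (k:Int) then ((a + 8 + 8 * (k:Int) - (a + 8) + 8 - 1) / 8).toNat else 0) = k := by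
    rcases Nat.eq_zero_or_pos k with hk | hk
    · simp [hk]
    · rw [if_pos (by omega)]
      have : (a + 8 + 8 * (k:Int) - (a + 8) + 8 - 1) = 8 * k + 7 := by ring
      rw [this]; omega
  rw [e2, List.range_succ_eq_map, List.map_cons, List.map_map]
  simp only [Nat.cast_zero, mul_zero, add_zero]
  congr 1
  apply List.map_congr_left
  intro j _
  simp only [Function.comp, Nat.succ_eq_add_one]
  push_cast
  ring

theorem pv_chunk_val (pre c suf : List Int) (hc : c.length = 8) :
    (PySem.List.pyRange (pre.length : Int) ((pre.length : Int) + 8) 1).foldl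
        (fun x j => x * 2 + PySem.List.pyGetD (pre ++ (c ++ suf)) j 0) 0
      = c.foldl (fun t b => t * 2 + b) 0 := by
  set L := pre ++ (c ++ suf) with hL
  have hLlen : L.length = pre.length + 8 + suf.length := by simp [hL, hc]; omega
  set xs := L.take (pre.length + 8) with hxs
  have hxlen : xs.length = pre.length + 8 := by
    simp [hxs, hLlen]
  have key := PySem.List.foldl_pyRange_pyGetD xs (0:Int)
      (fun x b => x * 2 + b) (0:Int) (a := (pre.length : Int)) (by positivity)
  have hlen_eq : PySem.List.len xs = (pre.length : Int) + 8 := by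
    simp [PySem.List.len, hxlen]
  rw [hlen_eq] at key
  have hcong : (PySem.List.pyRange (pre.length : Int) ((pre.length : Int) + 8) 1).foldl
        (fun x j => x * 2 + PySem.List.pyGetD L j 0) 0
      = (PySem.List.pyRange (pre.length : Int) ((pre.length : Int) + 8) 1).foldl
        (fun x j => x * 2 + PySem.List.pyGetD xs j 0) 0 := by
    apply PySem.List.foldl_congr_mem
    intro acc j hj
    rw [PySem.List.mem_pyRange_one] at hj
    have h1 : 0 ≤ j := le_trans (by positivity) hj.1
    have h2 : j < (xs.length : Int) := by rw [hxlen]; push_cast; omega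
    have h3 : j < (L.length : Int) := by rw [hLlen]; push_cast; omega
    rw [PySem.List.pyGetD_eq_getElem L 0 h1 h3, PySem.List.pyGetD_eq_getElem xs 0 h1 h2]
    simp [hxs]
  rw [hcong, key]
  have hdrop : xs.drop (pre.length : Int).toNat = c := by
    rw [hxs, Int.toNat_natCast, List.drop_take, hL, List.drop_left]
    have h8 : pre.length + 8 - pre.length = 8 := by omega
    rw [h8, ← hc, List.take_left]
  rw [hdrop]

theorem pv_A_loop (k : Nat) (pre l : List Int) (res : String)
    (hl : l.length = 8 * k) :
    (PySem.List.pyRange (pre.length : Int) ((pre.length : Int) + 8 * k) 8).foldl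
        (fun res i =>
          res.push (Char.ofNat ((PySem.List.pyRange i (i + 8) 1).foldl
            (fun x j => x * 2 + PySem.List.pyGetD (pre ++ l) j 0) 0).toNat))
        res
      = res ++ String.ofList ((pvWindowsF k l).map
          (fun w => Char.ofNat ((w.foldl (fun t b => t * 2 + b) 0).toNat))) := by
  induction k generalizing pre l res with
  | zero =>
    have hl0 : l = [] := List.eq_nil_of_length_eq_zero (by omega)
    subst hl0
    simp only [Nat.cast_zero, mul_zero, add_zero]
    rw [pv_range8_nil]
    apply String.toList_inj.mp
    simp [pvWindowsF]
  | succ k ih =>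
    have hlc : l = l.take 8 ++ l.drop 8 := (List.take_append_drop 8 l).symm
    set c := l.take 8 with hc
    set rest := l.drop 8 with hrest
    have hclen : c.length = 8 := by simp [hc]; omega
    have hrlen : rest.length = 8 * k := by simp [hrest]; omega
    have hcast : ((pre.length : Int) + 8 * ((k : Nat) + 1 : Nat)) = (pre.length : Int) + 8 * ((k : Int) + 1) := by push_cast; ring
    rw [hcast, pv_range8_cons]
    rw [List.foldl_cons]
    have hchunk : (PySem.List.pyRange (pre.length : Int) ((pre.length : Int) + 8) 1).foldl
        (fun x j => x * 2 + PySem.List.pyGetD (pre ++ l) j 0) 0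
        = c.foldl (fun t b => t * 2 + b) 0 := by
      conv_lhs => rw [hlc]
      exact pv_chunk_val pre c rest hclen
    rw [hchunk]
    have hassoc : pre ++ l = (pre ++ c) ++ rest := by rw [hlc, List.append_assoc]
    have hlen2 : ((pre ++ c).length : Int) = (pre.length : Int) + 8 := by simp [hclen]
    have hrw : (pre.length : Int) + 8 + 8 * (k : Int) = ((pre ++ c).length : Int) + 8 * (k : Int) := by
      rw [hlen2]
    rw [hassoc, hrw, ← hlen2]
    rw [ih (pre ++ c) rest _ hrlen]
    have hwins : pvWindowsF (k + 1) l = c :: pvWindowsF k rest := rfl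
    rw [hwins]
    apply String.toList_inj.mp
    simp

theorem pv_windows_snoc (t : Nat) (l w : List Int) (hl : l.length = 8 * t) (hw : w.length ≤ 8) :
    pvWindowsF (t + 1) (l ++ w) = pvWindowsF t l ++ [w] := by
  induction t generalizing l with
  | zero =>
    have hl0 : l = [] := List.eq_nil_of_length_eq_zero (by omega)
    subst hl0
    simp [pvWindowsF, List.take_of_length_le hw]
  | succ t ih =>
    show (l ++ w).take 8 :: pvWindowsF (t + 1) ((l ++ w).drop 8) = _
    rw [List.take_append_of_le_length (by omega), List.drop_append_of_le_length (by omega),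
        ih (l.drop 8) (by simp [hl]; omega)]
    rfl

theorem pv_B_loop (m : Nat) (lst : List Int) (i : Int) (out : List Char)
    (hm : i.toNat ≤ m) (h0 : 0 ≤ i) (hlen : i ≤ (lst.length : Int)) :
    binAltLoop lst i out
      = out ++ ((pvWindowsF ((i.toNat + 7) / 8)
            (List.replicate ((8 - i.toNat % 8) % 8) (0 : Int) ++ lst.take i.toNat)).map
          (fun w => Char.ofNat ((w.foldl (fun a b => a * 2 + b) 0).toNat))).reverse := by
  induction m generalizing i out with
  | zero =>
    have hi : i = 0 := by omega
    subst hi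
    rw [binAltLoop]
    simp [pvWindowsF]
  | succ m ih =>
    by_cases hpos : 0 < i
    · rw [binAltLoop, if_pos hpos]
      set n := i.toNat with hn
      have hni : i = (n : Int) := by omega
      by_cases hbig : 8 < i
      · -- full chunk from the middle
        have hmax : max 0 (i - 8) = ((n - 8 : Nat) : Int) := by omega
        have hslice : PySem.List.slice lst (some (max 0 (i - 8))) (some i)
            = (lst.take n).drop (n - 8) := by
          rw [hmax, hni, PySem.List.slice_natCast, List.drop_take]
        set w := (lst.take n).drop (n - 8) with hw
        have hwlen : w.length = 8 := by simp [hw]; omega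
        have hx : (PySem.List.slice lst (some (max 0 (i - 8))) (some i)).reverse.zipIdx.foldl
              (fun x p => x + p.1 * 2 ^ p.2) 0 = w.foldl (fun a b => a * 2 + b) 0 := by
          rw [hslice]
          exact pv_shift_sum_eq_horner w
        show binAltLoop lst (i - 8) (out ++ [Char.ofNat (((PySem.List.slice lst (some (max 0 (i - 8))) (some i)).reverse.zipIdx.foldl (fun (x : Int) (p : Int × Nat) => x + p.1 * 2 ^ p.2) 0).toNat)]) = _
        rw [hx]
        rw [ih (i - 8) _ (by omega) (by omega) (by omega)]
        have hto : (i - 8).toNat = n - 8 := by omega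
        rw [hto]
        have hmod : (n - 8) % 8 = n % 8 := by omega
        have hsplit : List.replicate ((8 - n % 8) % 8) (0 : Int) ++ lst.take n
            = (List.replicate ((8 - n % 8) % 8) (0 : Int) ++ lst.take (n - 8)) ++ w := by
          rw [List.append_assoc]
          congr 1
          rw [hw]
          conv_lhs => rw [← List.take_append_drop (n - 8) (lst.take n)]
          rw [List.take_take, min_eq_left (by omega : n - 8 ≤ n)]
        have hdiv : (n + 7) / 8 = (n - 8 + 7) / 8 + 1 := by omega
        rw [hmod, hsplit, hdiv,
            pv_windows_snoc _ _ _ (by simp; omega) (by omega)]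
        simp [List.append_assoc]
      · -- last (possibly short) chunk at the front
        have hle : i ≤ 8 := by omega
        have hmax : max 0 (i - 8) = ((0 : Nat) : Int) := by omega
        have hslice : PySem.List.slice lst (some (max 0 (i - 8))) (some i) = lst.take n := by
          rw [hmax, hni, PySem.List.slice_natCast]
          simp
        set X := List.replicate ((8 - n % 8) % 8) (0 : Int) ++ lst.take n with hX
        have hXlen : X.length = 8 := by simp [hX]; omega
        have hdiv : (n + 7) / 8 = 1 := by omega
        have hwins : pvWindowsF ((n + 7) / 8) X = [X] := by
          rw [hdiv]
          show X.take 8 :: pvWindowsF 0 (X.drop 8) = [X]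
          rw [List.take_of_length_le (by omega)]
          rfl
        have hxval : (PySem.List.slice lst (some (max 0 (i - 8))) (some i)).reverse.zipIdx.foldl
              (fun x p => x + p.1 * 2 ^ p.2) 0 = X.foldl (fun a b => a * 2 + b) 0 := by
          rw [hslice, pv_shift_sum_eq_horner, hX, pv_val_append, pv_val_replicate_zero]
          ring
        show binAltLoop lst (i - 8) (out ++ [Char.ofNat (((PySem.List.slice lst (some (max 0 (i - 8))) (some i)).reverse.zipIdx.foldl (fun (x : Int) (p : Int × Nat) => x + p.1 * 2 ^ p.2) 0).toNat)]) = _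
        rw [hxval]
        rw [binAltLoop, if_neg (by omega)]
        rw [hwins]
        simp
    · have hi : i = 0 := by omega
      subst hi
      rw [binAltLoop]
      simp [pvWindowsF]

-- ===== VERDICT (by name: the statement is the Claim_ definition above) =====
theorem bin_list_to_string_spec : Claim_equal_bin_list_to_string := by
  intro lst _hdom _hpre
  unfold Spec_bin_list_to_string bin_list_to_string bin_list_to_string_alt
  simp only []
  set n := lst.length with hn
  have hsame : (if n % 8 ≠ 0 then List.replicate (8 - n % 8) (0 : Int) ++ lst else lst)
      = List.replicate ((8 - n % 8) % 8) (0 : Int) ++ lst := by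
    by_cases h : n % 8 ≠ 0
    · rw [if_pos h]
      congr 2
      omega
    · rw [if_neg h]
      have : (8 - n % 8) % 8 = 0 := by omega
      rw [this]
      simp
  rw [hsame]
  set bits := List.replicate ((8 - n % 8) % 8) (0 : Int) ++ lst with hbits
  have hblen : bits.length = 8 * ((n + 7) / 8) := by
    simp [hbits]
    omega
  have hA := pv_A_loop ((n + 7) / 8) [] bits "" hblen
  simp only [List.nil_append, List.length_nil, Nat.cast_zero, zero_add] at hA
  have hcast : (bits.length : Int) = 8 * (((n + 7) / 8 : Nat) : Int) := by
    rw [hblen]; push_cast; ring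
  rw [hcast, hA]
  have hB := pv_B_loop n lst (n : Int) [] (by omega) (by omega) (by omega)
  rw [Int.toNat_natCast] at hB
  rw [hB]
  rw [List.take_length]
  apply String.toList_inj.mp
  simp [hbits]
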